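-- pv_equiv track=rewrite | github.com/ldydek/AGH-ASD | Algorithms from lectures/Data structures for disjoint sets/find_union.py | find_union_make_set
-- ===== SOURCE A (Python) =====
-- from math import inf
--
-- def make_set(tab):
--     n = len(tab)
--     v = -inf
--     for x in range(n):
--         v = max(v, tab[x][0], tab[x][1])
--     return v
--
-- def find(parent, x):
--     if parent[x] != x:
--         parent[x] = find(parent, parent[x])
--     return parent[x]
--
-- def union(x, y, parent, rank):
--     x = find(parent, x)
--     y = find(parent, y)
--     if rank[x] > rank[y]:
--         parent[y] = x
--     elif rank[x] < rank[y]: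
--         parent[x] = y
--     else:
--         parent[x] = y
--         rank[y] += 1
--
-- def find_union_make_set(tab):
--     v = make_set(tab)
--     v += 1
--     n = len(tab)
--     parent = [x for x in range(v)]
--     rank = [0]*v
--     for x in range(n):
--         if find(parent, tab[x][0]) != find(parent, tab[x][1]):
--             union(tab[x][0], tab[x][1], parent, rank)
--     return parent
-- ===== SOURCE B (Python) =====
-- def find_union_make_set(tab):
--     v = 1 + max(max(e[0], e[1]) for e in tab)
--     parent = list(range(v))
--     rank = [0] * v
--     for e in tab:
--         ra = _find(parent, e[0])
--         rb = _find(parent, e[1])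
--         if ra == rb:
--             continue
--         if rank[ra] > rank[rb]:
--             parent[rb] = ra
--         elif rank[ra] < rank[rb]:
--             parent[ra] = rb
--         else:
--             parent[ra] = rb
--             rank[rb] += 1
--     return parent
--
--
-- def _find(parent, x):
--     # pass 1: locate the root
--     r = x
--     while parent[r] != r:
--         r = parent[r]
--     # pass 2: point every node on the path straight at the root
--     while parent[x] != r:
--         nxt = parent[x]
--         parent[x] = r
--         x = nxt
--     return r
-- ===== Notes on version B (the rewrite author's own statement) =====
-- stated objective: alternative
-- what changed: The recursive path-compressing find is replaced by an iterative two-pass find (walk to the root, then re-point every visited node at it), and the union helper with its two redundant find calls is gone: B computes each endpoint's root exactly once per edge and links by rank inline; the maximum node is computed by a single max over per-row maxima instead of the -inf accumulator loop.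
import Mathlib
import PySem

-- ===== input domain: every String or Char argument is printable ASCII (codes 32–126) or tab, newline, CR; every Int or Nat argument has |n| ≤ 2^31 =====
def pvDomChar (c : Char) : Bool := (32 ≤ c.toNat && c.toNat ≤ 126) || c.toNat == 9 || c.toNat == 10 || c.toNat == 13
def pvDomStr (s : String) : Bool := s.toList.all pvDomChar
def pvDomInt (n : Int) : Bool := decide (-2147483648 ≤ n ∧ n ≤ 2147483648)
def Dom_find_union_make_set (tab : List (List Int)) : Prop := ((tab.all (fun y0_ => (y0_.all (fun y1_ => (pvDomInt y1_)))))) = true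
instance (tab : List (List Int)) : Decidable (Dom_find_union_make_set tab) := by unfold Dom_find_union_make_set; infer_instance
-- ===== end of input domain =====

-- B replaces the recursive path-compressing find by an iterative two-pass find and inlines
-- union (one find per endpoint instead of two); same output, no speed claim.
-- Both Pythons mutate only lists they themselves create, so return-value equivalence is full equivalence.

-- ===== PORT A =====
-- pg/ps: Python list read xs[i] / write xs[i] = v (shared primitive wrappers, used by both ports)
def pg (p : List Int) (i : Int) : Int := PySem.List.pyGetD p i 0
def ps (p : List Int) (i v : Int) : List Int := PySem.List.pySetD p i v

-- max(v, a, b) with v starting as -inf (none)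
def pvMax3 : Option Int → Int → Int → Option Int
  | none, a, b => some (max a b)
  | some v, a, b => some (max (max v a) b)

def make_setA (tab : List (List Int)) : Option Int :=
  (List.range tab.length).foldl
    (fun (v : Option Int) (x : Nat) =>
      let row := PySem.List.pyGetD tab (x : Int) []
      pvMax3 v (pg row 0) (pg row 1)) none

def findA : Nat → List Int → Int → List Int × Int
  | 0, p, x => (p, x)   -- fuel exhausted; never reached under Pre_ (paths are shorter than the list)
  | f+1, p, x =>
    if pg p x ≠ x then
      let pr := findA f p (pg p x)
      let p2 := ps pr.1 x pr.2
      (p2, pg p2 x)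
    else (p, pg p x)

def unionA (x y : Int) (parent rank : List Int) : List Int × List Int :=
  let fx := findA parent.length parent x
  let fy := findA fx.1.length fx.1 y
  if pg rank fx.2 > pg rank fy.2 then (ps fy.1 fy.2 fx.2, rank)
  else if pg rank fx.2 < pg rank fy.2 then (ps fy.1 fx.2 fy.2, rank)
  else (ps fy.1 fx.2 fy.2, ps rank fy.2 (pg rank fy.2 + 1))

def find_union_make_set (tab : List (List Int)) : List Int :=
  match make_setA tab with
  | none => []   -- Python: v stays -inf and range(-inf) raises TypeError; excluded by Pre_
  | some v0 =>
    let v := v0 + 1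
    let st := (List.range tab.length).foldl
      (fun (st : List Int × List Int) (x : Nat) =>
        let row := PySem.List.pyGetD tab (x : Int) []
        let f1 := findA st.1.length st.1 (pg row 0)
        let f2 := findA f1.1.length f1.1 (pg row 1)
        if f1.2 ≠ f2.2 then unionA (pg row 0) (pg row 1) f2.1 st.2
        else (f2.1, st.2))
      (PySem.List.pyRange 0 v 1, List.replicate v.toNat 0)
    st.1

-- ===== PORT B =====
def rowMax (e : List Int) : Int := max (pg e 0) (pg e 1)

def maxB (tab : List (List Int)) : Option Int :=
  match tab with
  | [] => none   -- Python: max() of an empty generator raises ValueError; excluded by Pre_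
  | e :: rest => some (rest.foldl (fun m e2 => max m (rowMax e2)) (rowMax e))

-- pass 1: walk to the root
def rootB : Nat → List Int → Int → Int
  | 0, _, r => r
  | f+1, p, r => if pg p r ≠ r then rootB f p (pg p r) else r

-- pass 2: re-point every node on the path at the root
def compressB : Nat → List Int → Int → Int → List Int
  | 0, p, _, _ => p
  | f+1, p, x, r => if pg p x ≠ r then compressB f (ps p x r) (pg p x) r else p

def findB (p : List Int) (x : Int) : List Int × Int :=
  let r := rootB p.length p x
  (compressB p.length p x r, r)

def find_union_make_set_alt (tab : List (List Int)) : List Int :=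
  match maxB tab with
  | none => []
  | some m =>
    let v := m + 1
    let st := tab.foldl
      (fun st e =>
        let f1 := findB st.1 (pg e 0)
        let f2 := findB f1.1 (pg e 1)
        if f1.2 = f2.2 then (f2.1, st.2)
        else if pg st.2 f1.2 > pg st.2 f2.2 then (ps f2.1 f2.2 f1.2, st.2)
        else if pg st.2 f1.2 < pg st.2 f2.2 then (ps f2.1 f1.2 f2.2, st.2)
        else (ps f2.1 f1.2 f2.2, ps st.2 f2.2 (pg st.2 f2.2 + 1)))
      (PySem.List.pyRange 0 v 1, List.replicate v.toNat 0)
    st.1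

-- ===== PRECONDITION & SPEC =====
-- pvM tab = the maximum node label (A's make_set value for a nonempty tab); used only by Pre_.
def pvM (tab : List (List Int)) : Int :=
  match tab with
  | [] => 0
  | e :: rest => rest.foldl
      (fun m e2 => max m (max (PySem.List.pyGetD e2 0 0) (PySem.List.pyGetD e2 1 0)))
      (max (PySem.List.pyGetD e 0 0) (PySem.List.pyGetD e 1 0))

-- Pre_ is exactly the set of inputs on which the Python A returns: a nonempty list (A: TypeError
-- on range(-inf)), rows with at least two entries (A: IndexError), and every node label at least
-- -(max+1) (below that A raises IndexError; labels in [-(max+1), 0) index the parent list from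
-- the end, Python's negative-index rule, which both programs follow alike).
def Pre_find_union_make_set (tab : List (List Int)) : Prop :=
  tab ≠ [] ∧ ∀ e ∈ tab, 2 ≤ e.length ∧ -(pvM tab + 1) ≤ PySem.List.pyGetD e 0 0 ∧
    -(pvM tab + 1) ≤ PySem.List.pyGetD e 1 0
instance (tab : List (List Int)) : Decidable (Pre_find_union_make_set tab) := by
  unfold Pre_find_union_make_set; infer_instance

def pvWitness_find_union_make_set : List (List Int) := [[0, 1], [2, 3], [1, 3]]

def Spec_find_union_make_set (tab : List (List Int)) (out : List Int) : Prop := out = find_union_make_set_alt tab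
instance (tab : List (List Int)) (out : List Int) : Decidable (Spec_find_union_make_set tab out) := by unfold Spec_find_union_make_set; infer_instance

-- ===== CLAIM (what is proved, stated in full; the proofs are below) =====
def Claim_equal_find_union_make_set : Prop := ∀ (tab : List (List Int)), Dom_find_union_make_set tab → Pre_find_union_make_set tab → Spec_find_union_make_set tab (find_union_make_set tab)

-- ===== LEMMAS AND PROOFS =====

-- ---- index/read/write basics ----
def inRI (p : List Int) (x : Int) : Prop := 0 ≤ x ∧ x < (p.length : Int)

lemma pv_len_ps (p : List Int) (y v : Int) : (ps p y v).length = p.length :=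
  PySem.List.length_pySetD p y v

lemma pv_inRI_of_len {p q : List Int} (h : q.length = p.length) {x : Int} (hx : inRI p x) :
    inRI q x := by simpa [inRI, h] using hx

lemma pv_pg_ps (p : List Int) (y v x : Int) (hy : inRI p y) (hx : 0 ≤ x) :
    pg (ps p y v) x = if x = y then v else pg p x := by
  obtain ⟨hy0, hy1⟩ := hy
  have hyl : y.toNat < p.length := by omega
  have hy' : ((y.toNat : Nat) : Int) = y := by omega
  have hx' : ((x.toNat : Nat) : Int) = x := by omega
  have h := PySem.List.pyGetD_pySetD_natCast p y.toNat x.toNat v 0 hyl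
  rw [hy', hx'] at h
  rw [pg, ps, h]
  by_cases hxy : x = y
  · rw [if_pos (by omega : x.toNat = y.toNat), if_pos hxy]
  · rw [if_neg (by omega : ¬ x.toNat = y.toNat), if_neg hxy, pg]

lemma pv_ps_self (p : List Int) (y : Int) (hy : inRI p y) : ps p y (pg p y) = p := by
  obtain ⟨hy0, hy1⟩ := hy
  have hyl : y.toNat < p.length := by omega
  rw [ps, pg, PySem.List.pySetD_of_nonneg p _ hy0, PySem.List.pyGetD_of_nonneg p _ hy0]
  rw [List.getD_eq_getElem?_getD, List.getElem?_eq_getElem hyl, Option.getD_some]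
  exact List.set_getElem_self hyl

lemma pv_ps_comm (p : List Int) (a b u v : Int) (ha : inRI p a) (hb : inRI p b) (hab : a ≠ b) :
    ps (ps p a u) b v = ps (ps p b v) a u := by
  obtain ⟨ha0, ha1⟩ := ha
  obtain ⟨hb0, hb1⟩ := hb
  simp only [ps, PySem.List.pySetD_of_nonneg _ _ ha0, PySem.List.pySetD_of_nonneg _ _ hb0]
  exact List.set_comm _ _ (by omega : a.toNat ≠ b.toNat)

-- ---- parent-pointer iteration ----
def iterP (p : List Int) : Nat → Int → Int
  | 0, x => x
  | k+1, x => iterP p k (pg p x)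

def isRootP (p : List Int) (x : Int) : Prop := pg p x = x

def InvP (p : List Int) : Prop :=
  (∀ z, inRI p z → inRI p (pg p z)) ∧ ∀ z, inRI p z → ∃ m, isRootP p (iterP p m z)

lemma iterP_succ_right (p : List Int) (k : Nat) (x : Int) :
    iterP p (k+1) x = pg p (iterP p k x) := by
  induction k generalizing x with
  | zero => rfl
  | succ k ih => rw [show iterP p (k+1+1) x = iterP p (k+1) (pg p x) from rfl, ih,
      show iterP p (k+1) x = iterP p k (pg p x) from rfl]

lemma iterP_add (p : List Int) (a b : Nat) (x : Int) :
    iterP p (a + b) x = iterP p b (iterP p a x) := by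
  induction a generalizing x with
  | zero => rw [Nat.zero_add]; rfl
  | succ a ih =>
    rw [show a + 1 + b = (a + b) + 1 by omega, show iterP p ((a+b)+1) x = iterP p (a+b) (pg p x) from rfl,
      ih, show iterP p (a+1) x = iterP p a (pg p x) from rfl]

lemma pv_root_iter (p : List Int) (r : Int) (h : isRootP p r) (m : Nat) : iterP p m r = r := by
  induction m with
  | zero => rfl
  | succ m ih => rw [show iterP p (m+1) r = iterP p m (pg p r) from rfl, h, ih]

lemma pv_iter_inR (p : List Int) (x : Int) (hR : ∀ z, inRI p z → inRI p (pg p z))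
    (hx : inRI p x) (j : Nat) : inRI p (iterP p j x) := by
  induction j with
  | zero => exact hx
  | succ j ih => rw [iterP_succ_right]; exact hR _ ih

lemma pv_path_inj (p : List Int) (x : Int) (k : Nat)
    (hroot : isRootP p (iterP p k x)) (hmin : ∀ j, j < k → ¬ isRootP p (iterP p j x))
    (a b : Nat) (hab : a < b) (hbk : b ≤ k) : iterP p a x ≠ iterP p b x := by
  intro heq
  have key : iterP p (a + (k - b)) x = iterP p k x := by
    rw [iterP_add, heq, ← iterP_add, show b + (k - b) = k by omega]
  exact hmin (a + (k - b)) (by omega) (by rw [show isRootP p (iterP p (a + (k-b)) x) =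
    isRootP p (iterP p k x) by rw [key]]; exact hroot)

lemma pv_path_k_lt (p : List Int) (x : Int) (k : Nat)
    (hR : ∀ z, inRI p z → inRI p (pg p z)) (hx : inRI p x)
    (hroot : isRootP p (iterP p k x)) (hmin : ∀ j, j < k → ¬ isRootP p (iterP p j x)) :
    k < p.length := by
  have hnd : ((List.range (k+1)).map (fun j => (iterP p j x).toNat)).Nodup := by
    refine List.Nodup.map_on ?_ (List.nodup_range)
    intro a ha b hb hfe
    simp only [List.mem_range] at ha hb
    by_contra hne
    have h1 : ∀ c d : Nat, c < d → d ≤ k → (iterP p c x).toNat ≠ (iterP p d x).toNat := by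
      intro c d hcd hdk he
      have hc0 : 0 ≤ iterP p c x := (pv_iter_inR p x hR hx c).1
      have hd0 : 0 ≤ iterP p d x := (pv_iter_inR p x hR hx d).1
      exact pv_path_inj p x k hroot hmin c d hcd hdk (by omega)
    rcases Nat.lt_or_ge a b with h | h
    · exact h1 a b h (by omega) hfe
    · exact h1 b a (by omega) (by omega) hfe.symm
  have hsub : ((List.range (k+1)).map (fun j => (iterP p j x).toNat)).toFinset ⊆
      Finset.range p.length := by
    intro n hn
    simp only [List.mem_toFinset, List.mem_map, List.mem_range] at hn
    obtain ⟨j, _, rfl⟩ := hn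
    have hj0 : 0 ≤ iterP p j x := (pv_iter_inR p x hR hx j).1
    have hj1 : iterP p j x < (p.length : Int) := (pv_iter_inR p x hR hx j).2
    simp only [Finset.mem_range]
    omega
  have hcard := Finset.card_le_card hsub
  rw [List.toFinset_card_of_nodup hnd, Finset.card_range] at hcard
  simp only [List.length_map, List.length_range] at hcard
  omega

-- ---- the canonical compressed list ----
def pathL (p : List Int) (x : Int) (k : Nat) : List Int := (List.range k).map (fun j => iterP p j x)

def cupd (p : List Int) (x : Int) (k : Nat) (r : Int) : List Int :=
  (pathL p x k).foldl (fun q y => ps q y r) p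

lemma pv_mem_pathL {p : List Int} {x z : Int} {k : Nat} :
    z ∈ pathL p x k ↔ ∃ j, j < k ∧ iterP p j x = z := by
  simp [pathL, List.mem_map, List.mem_range]

lemma pv_len_foldl_ps (nodes : List Int) (p : List Int) (r : Int) :
    (nodes.foldl (fun q y => ps q y r) p).length = p.length := by
  induction nodes generalizing p with
  | nil => rfl
  | cons y ys ih => rw [List.foldl_cons, ih, pv_len_ps]

lemma pv_pg_foldl_ps (nodes : List Int) (p : List Int) (r z : Int) (hz : 0 ≤ z)
    (hn : ∀ y ∈ nodes, inRI p y) :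
    pg (nodes.foldl (fun q y => ps q y r) p) z = if z ∈ nodes then r else pg p z := by
  induction nodes generalizing p with
  | nil => simp
  | cons y ys ih =>
    have hy : inRI p y := hn y (by simp)
    have hys : ∀ w ∈ ys, inRI (ps p y r) w := fun w hw =>
      pv_inRI_of_len (pv_len_ps p y r) (hn w (by simp [hw]))
    rw [List.foldl_cons, ih (ps p y r) hys, pv_pg_ps p y r z hy hz]
    by_cases h1 : z ∈ ys
    · simp [h1]
    · by_cases h2 : z = y <;> simp [h1, h2]

lemma pv_ps_foldl_comm (nodes : List Int) (p : List Int) (x r : Int) (hx : inRI p x)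
    (hnx : x ∉ nodes) (hn : ∀ y ∈ nodes, inRI p y) :
    ps (nodes.foldl (fun q y => ps q y r) p) x r = nodes.foldl (fun q y => ps q y r) (ps p x r) := by
  induction nodes generalizing p with
  | nil => rfl
  | cons y ys ih =>
    have hy : inRI p y := hn y (by simp)
    have hxy : x ≠ y := by intro h; exact hnx (by simp [h])
    have hys : ∀ w ∈ ys, inRI (ps p y r) w := fun w hw =>
      pv_inRI_of_len (pv_len_ps p y r) (hn w (by simp [hw]))
    rw [List.foldl_cons, List.foldl_cons,
      ih (ps p y r) (pv_inRI_of_len (pv_len_ps p y r) hx) (by intro h; exact hnx (by simp [h])) hys,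
      pv_ps_comm p y x r r hy hx (Ne.symm hxy)]

lemma pv_pathL_cons (p : List Int) (x : Int) (k : Nat) :
    pathL p x (k+1) = x :: pathL p (pg p x) k := by
  rw [pathL, List.range_succ_eq_map, List.map_cons, List.map_map]
  rfl

lemma pv_len_cupd (p : List Int) (x : Int) (k : Nat) (r : Int) :
    (cupd p x k r).length = p.length := pv_len_foldl_ps _ _ _

lemma pv_pg_cupd (p : List Int) (x : Int) (k : Nat) (r z : Int) (hz : 0 ≤ z)
    (hn : ∀ y ∈ pathL p x k, inRI p y) :
    pg (cupd p x k r) z = if z ∈ pathL p x k then r else pg p z := pv_pg_foldl_ps _ _ _ _ hz hn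

-- ---- the two find implementations compute the canonical compression ----
lemma pv_findA_eq (p : List Int) (hR : ∀ z, inRI p z → inRI p (pg p z)) (k : Nat) :
    ∀ (x : Int), inRI p x → isRootP p (iterP p k x) → (∀ j, j < k → ¬ isRootP p (iterP p j x)) →
    ∀ f, k < f → findA f p x = (cupd p x k (iterP p k x), iterP p k x) := by
  induction k with
  | zero =>
    intro x hx hroot hmin f hf
    cases f with
    | zero => omega
    | succ f =>
      have h0 : pg p x = x := hroot
      simp only [findA]
      rw [if_neg (by simp [h0])]
      rw [show iterP p 0 x = x from rfl, h0]
      rfl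
  | succ k ih =>
    intro x hx hroot hmin f hf
    cases f with
    | zero => omega
    | succ f =>
      have h0 : pg p x ≠ x := fun h => hmin 0 (by omega) h
      have hx1 : inRI p (pg p x) := hR x hx
      have ihx := ih (pg p x) hx1 hroot (fun j hj => hmin (j+1) (by omega)) f (by omega)
      have hn : ∀ y ∈ pathL p (pg p x) k, inRI p y := by
        intro y hy
        obtain ⟨j, hj, rfl⟩ := pv_mem_pathL.mp hy
        exact pv_iter_inR p (pg p x) hR hx1 j
      have hxn : x ∉ pathL p (pg p x) k := by
        intro hxm
        obtain ⟨j, hj, hje⟩ := pv_mem_pathL.mp hxm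
        exact pv_path_inj p x (k+1) hroot hmin 0 (j+1) (by omega) (by omega) hje.symm
      have hQx : inRI (cupd p (pg p x) k (iterP p k (pg p x))) x :=
        pv_inRI_of_len (pv_len_cupd p (pg p x) k _) hx
      have comp1 : ps (cupd p (pg p x) k (iterP p k (pg p x))) x (iterP p k (pg p x))
          = cupd p x (k+1) (iterP p k (pg p x)) := by
        rw [cupd, cupd, pv_pathL_cons, List.foldl_cons]
        exact pv_ps_foldl_comm _ p x _ hx hxn hn
      have comp2 : pg (ps (cupd p (pg p x) k (iterP p k (pg p x))) x (iterP p k (pg p x))) x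
          = iterP p k (pg p x) := by
        rw [pv_pg_ps _ x _ x hQx hx.1]
        simp
      simp only [findA]
      rw [if_pos h0, ihx]
      show (ps (cupd p (pg p x) k (iterP p k (pg p x))) x (iterP p k (pg p x)),
            pg (ps (cupd p (pg p x) k (iterP p k (pg p x))) x (iterP p k (pg p x))) x)
          = (cupd p x (k+1) (iterP p k (pg p x)), iterP p k (pg p x))
      rw [comp2, comp1]

lemma pv_rootB_eq (p : List Int) (k : Nat) :
    ∀ (x : Int), isRootP p (iterP p k x) → (∀ j, j < k → ¬ isRootP p (iterP p j x)) →
    ∀ f, k < f → rootB f p x = iterP p k x := by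
  induction k with
  | zero =>
    intro x hroot hmin f hf
    cases f with
    | zero => omega
    | succ f =>
      have h0 : pg p x = x := hroot
      simp only [rootB]
      rw [if_neg (by simp [h0])]
      rfl
  | succ k ih =>
    intro x hroot hmin f hf
    cases f with
    | zero => omega
    | succ f =>
      have h0 : pg p x ≠ x := fun h => hmin 0 (by omega) h
      simp only [rootB]
      rw [if_pos h0]
      exact ih (pg p x) hroot (fun j hj => hmin (j+1) (by omega)) f (by omega)

lemma pv_compressB_eq (k : Nat) :
    ∀ (p : List Int) (x : Int), (∀ z, inRI p z → inRI p (pg p z)) → inRI p x →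
    isRootP p (iterP p k x) → (∀ j, j < k → ¬ isRootP p (iterP p j x)) →
    ∀ f, k ≤ f → compressB f p x (iterP p k x) = cupd p x k (iterP p k x) := by
  induction k with
  | zero =>
    intro p x hR hx hroot hmin f hf
    cases f with
    | zero => rfl
    | succ f =>
      have h0 : pg p x = x := hroot
      have hcond : ¬ (pg p x ≠ iterP p 0 x) := by
        rw [show iterP p 0 x = x from rfl, h0]; exact fun h => h rfl
      simp only [compressB]
      rw [if_neg hcond]
      rfl
  | succ k ih =>
    intro p x hR hx hroot hmin f hf
    cases f with
    | zero => omega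
    | succ f =>
      by_cases hk : k = 0
      · subst hk
        have hcond : ¬ (pg p x ≠ iterP p 1 x) := fun h => h rfl
        simp only [compressB]
        rw [if_neg hcond]
        have hc : cupd p x 1 (iterP p 1 x) = ps p x (pg p x) := by
          rw [cupd, pv_pathL_cons]
          rfl
        rw [hc, pv_ps_self p x hx]
      · have hkpos : 0 < k := Nat.pos_of_ne_zero hk
        have hcond : pg p x ≠ iterP p (k+1) x := by
          intro h
          exact hmin 1 (by omega) (by
            show isRootP p (iterP p 1 x)
            have h1 : iterP p 1 x = iterP p (k+1) x := h
            rw [h1]; exact hroot)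
        simp only [compressB]
        rw [if_pos hcond]
        have hx1 : inRI p (pg p x) := hR x hx
        have hrin : inRI p (iterP p (k+1) x) := pv_iter_inR p x hR hx (k+1)
        have hner : ∀ j, j + 1 ≤ k + 1 → iterP p (j+1) x ≠ x := by
          intro j hj h
          exact pv_path_inj p x (k+1) hroot hmin 0 (j+1) (by omega) hj h.symm
        have hlen : (ps p x (iterP p (k+1) x)).length = p.length := pv_len_ps _ _ _
        have hpg' : ∀ z, 0 ≤ z → z ≠ x → pg (ps p x (iterP p (k+1) x)) z = pg p z := by
          intro z hz hzx
          rw [pv_pg_ps p x _ z hx hz, if_neg hzx]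
        have hshift : ∀ j, j ≤ k → iterP (ps p x (iterP p (k+1) x)) j (pg p x) = iterP p (j+1) x := by
          intro j
          induction j with
          | zero => intro _; rfl
          | succ j ihj =>
            intro hj
            rw [iterP_succ_right, ihj (by omega),
              hpg' _ (pv_iter_inR p x hR hx (j+1)).1 (hner j (by omega)), ← iterP_succ_right]
        have hR' : ∀ z, inRI (ps p x (iterP p (k+1) x)) z →
            inRI (ps p x (iterP p (k+1) x)) (pg (ps p x (iterP p (k+1) x)) z) := by
          intro z hz
          have hz' : inRI p z := pv_inRI_of_len hlen.symm hz
          rw [pv_pg_ps p x _ z hx hz'.1]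
          by_cases hzx : z = x
          · rw [if_pos hzx]; exact pv_inRI_of_len hlen hrin
          · rw [if_neg hzx]; exact pv_inRI_of_len hlen (hR z hz')
        have hx' : inRI (ps p x (iterP p (k+1) x)) (pg p x) := pv_inRI_of_len hlen hx1
        have hrne : iterP p (k+1) x ≠ x := hner k (by omega)
        have hroot' : isRootP (ps p x (iterP p (k+1) x))
            (iterP (ps p x (iterP p (k+1) x)) k (pg p x)) := by
          rw [hshift k (le_refl k)]
          show pg (ps p x (iterP p (k+1) x)) (iterP p (k+1) x) = iterP p (k+1) x
          rw [hpg' _ hrin.1 hrne]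
          exact hroot
        have hmin' : ∀ j, j < k → ¬ isRootP (ps p x (iterP p (k+1) x))
            (iterP (ps p x (iterP p (k+1) x)) j (pg p x)) := by
          intro j hj hcon
          rw [hshift j (by omega)] at hcon
          have he : pg (ps p x (iterP p (k+1) x)) (iterP p (j+1) x) = pg p (iterP p (j+1) x) :=
            hpg' _ (pv_iter_inR p x hR hx (j+1)).1 (hner j (by omega))
          rw [isRootP, he] at hcon
          exact hmin (j+1) (by omega) hcon
        have ihres := ih (ps p x (iterP p (k+1) x)) (pg p x) hR' hx' hroot' hmin' f (by omega)
        have e := hshift k (le_refl k)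
        rw [e] at ihres
        rw [ihres]
        have hpathshift : pathL (ps p x (iterP p (k+1) x)) (pg p x) k = pathL p (pg p x) k := by
          simp only [pathL]
          apply List.map_congr_left
          intro j hj
          simp only [List.mem_range] at hj
          exact hshift j (by omega)
        have hfinal : cupd p x (k+1) (iterP p (k+1) x)
            = cupd (ps p x (iterP p (k+1) x)) (pg p x) k (iterP p (k+1) x) := by
          rw [cupd, cupd, pv_pathL_cons, List.foldl_cons, hpathshift]
        exact hfinal.symm

-- ---- invariant preservation ----
lemma pv_InvP_abstract (p Q S : List Int) (r : Int)
    (hlen : Q.length = p.length) (hrin : inRI p r) (hrS : r ∉ S) (hrroot : isRootP p r)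
    (hpg : ∀ z, 0 ≤ z → pg Q z = if z ∈ S then r else pg p z)
    (hInv : InvP p) : InvP Q := by
  obtain ⟨hR, hreach⟩ := hInv
  have hQr : pg Q r = r := by rw [hpg r hrin.1, if_neg hrS]; exact hrroot
  constructor
  · intro z hz
    have hz' : inRI p z := pv_inRI_of_len hlen.symm hz
    rw [hpg z hz'.1]
    by_cases hm : z ∈ S
    · rw [if_pos hm]; exact pv_inRI_of_len hlen hrin
    · rw [if_neg hm]; exact pv_inRI_of_len hlen (hR z hz')
  · have aux : ∀ m z, inRI p z → isRootP p (iterP p m z) → ∃ m', isRootP Q (iterP Q m' z) := by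
      intro m
      induction m with
      | zero =>
        intro z hz hzr
        by_cases hm : z ∈ S
        · refine ⟨1, ?_⟩
          show isRootP Q (pg Q z)
          rw [hpg z hz.1, if_pos hm]
          exact hQr
        · refine ⟨0, ?_⟩
          show pg Q z = z
          rw [hpg z hz.1, if_neg hm]
          exact hzr
      | succ m ihm =>
        intro z hz hzr
        by_cases hm : z ∈ S
        · refine ⟨1, ?_⟩
          show isRootP Q (pg Q z)
          rw [hpg z hz.1, if_pos hm]
          exact hQr
        · by_cases hzroot : isRootP p z
          · refine ⟨0, ?_⟩
            show pg Q z = z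
            rw [hpg z hz.1, if_neg hm]
            exact hzroot
          · obtain ⟨m', hm'⟩ := ihm (pg p z) (hR z hz) hzr
            refine ⟨m' + 1, ?_⟩
            show isRootP Q (iterP Q m' (pg Q z))
            rw [hpg z hz.1, if_neg hm]
            exact hm'
    intro z hz
    have hz' : inRI p z := pv_inRI_of_len hlen.symm hz
    obtain ⟨m, hm⟩ := hreach z hz'
    exact aux m z hz' hm

lemma pv_InvP_cupd (p : List Int) (x : Int) (k : Nat) (hInv : InvP p) (hx : inRI p x)
    (hroot : isRootP p (iterP p k x)) (hmin : ∀ j, j < k → ¬ isRootP p (iterP p j x)) :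
    InvP (cupd p x k (iterP p k x)) := by
  have hR := hInv.1
  have hn : ∀ y ∈ pathL p x k, inRI p y := by
    intro y hy
    obtain ⟨j, hj, rfl⟩ := pv_mem_pathL.mp hy
    exact pv_iter_inR p x hR hx j
  have hrnp : iterP p k x ∉ pathL p x k := by
    intro hm
    obtain ⟨j, hj, hje⟩ := pv_mem_pathL.mp hm
    exact pv_path_inj p x k hroot hmin j k hj (le_refl k) hje
  exact pv_InvP_abstract p _ (pathL p x k) (iterP p k x) (pv_len_cupd p x k _)
    (pv_iter_inR p x hR hx k) hrnp hroot
    (fun z hz => pv_pg_cupd p x k _ z hz hn) hInv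

lemma pv_InvP_link (p : List Int) (r0 r1 : Int) (hInv : InvP p) (h0 : inRI p r0) (h1 : inRI p r1)
    (hr0 : isRootP p r0) (hr1 : isRootP p r1) (hne : r0 ≠ r1) : InvP (ps p r0 r1) := by
  refine pv_InvP_abstract p (ps p r0 r1) [r0] r1 (pv_len_ps p r0 r1) h1
    (by simpa using Ne.symm hne) hr1 ?_ hInv
  intro z hz
  rw [pv_pg_ps p r0 r1 z h0 hz]
  simp

-- ---- one find call: both ports, packaged ----
lemma pv_find_pack (p : List Int) (a : Int) (hInv : InvP p) (ha : inRI p a) :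
    ∃ Q r, findA p.length p a = (Q, r) ∧ findB p a = (Q, r) ∧ Q.length = p.length ∧
      InvP Q ∧ inRI p r ∧ pg Q r = r ∧ pg Q a = r ∧
      (∀ z, inRI p z → isRootP p (pg p z) → pg p z ≠ r → pg Q z = pg p z) := by
  have hR := hInv.1
  haveI : DecidablePred (fun n => isRootP p (iterP p n a)) := fun n => by
    unfold isRootP; infer_instance
  have hex : ∃ k, isRootP p (iterP p k a) := hInv.2 a ha
  obtain ⟨k, hroot, hmin⟩ : ∃ k, isRootP p (iterP p k a) ∧ ∀ j, j < k → ¬ isRootP p (iterP p j a) :=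
    ⟨Nat.find hex, Nat.find_spec hex, fun j hj => Nat.find_min hex hj⟩
  have hk : k < p.length := pv_path_k_lt p a k hR ha hroot hmin
  have hn : ∀ y ∈ pathL p a k, inRI p y := by
    intro y hy
    obtain ⟨j, hj, rfl⟩ := pv_mem_pathL.mp hy
    exact pv_iter_inR p a hR ha j
  have hrnp : iterP p k a ∉ pathL p a k := by
    intro hm
    obtain ⟨j, hj, hje⟩ := pv_mem_pathL.mp hm
    exact pv_path_inj p a k hroot hmin j k hj (le_refl k) hje
  refine ⟨cupd p a k (iterP p k a), iterP p k a, ?_, ?_, pv_len_cupd p a k _,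
    pv_InvP_cupd p a k hInv ha hroot hmin, pv_iter_inR p a hR ha k, ?_, ?_, ?_⟩
  · exact pv_findA_eq p hR k a ha hroot hmin p.length hk
  · simp only [findB]
    rw [pv_rootB_eq p k a hroot hmin p.length hk,
      pv_compressB_eq k p a hR ha hroot hmin p.length (le_of_lt hk)]
  · rw [pv_pg_cupd p a k _ _ (pv_iter_inR p a hR ha k).1 hn, if_neg hrnp]
    exact hroot
  · by_cases hk0 : k = 0
    · subst hk0
      exact hroot
    · rw [pv_pg_cupd p a k _ a ha.1 hn,
        if_pos (show a ∈ pathL p a k from pv_mem_pathL.mpr ⟨0, by omega, rfl⟩)]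
  · intro z hz hzroot hzner
    have hzn : z ∉ pathL p a k := by
      intro hm
      obtain ⟨j, hj, hje⟩ := pv_mem_pathL.mp hm
      have h1 : iterP p (k - j) z = iterP p k a := by
        rw [← hje, ← iterP_add, show j + (k - j) = k by omega]
      have h2 : iterP p (k - j) z = pg p z := by
        rw [show k - j = 1 + ((k - j) - 1) by omega, iterP_add]
        exact pv_root_iter p (pg p z) hzroot _
      exact hzner (by rw [← h2, h1])
    rw [pv_pg_cupd p a k _ z hz.1 hn, if_neg hzn]

lemma pv_findA_idem (q : List Int) (a r : Int) (hq : inRI q a) (hr : inRI q r)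
    (h1 : pg q a = r) (h2 : pg q r = r) : findA q.length q a = (q, r) := by
  by_cases har : a = r
  · subst har
    obtain ⟨L, hL⟩ : ∃ L, q.length = L + 1 := ⟨q.length - 1, by
      have h3 := hq.1; have h4 := hq.2; omega⟩
    rw [hL]
    simp only [findA]
    rw [if_neg (by simp [h1])]
    rw [h1]
  · have hlen2 : 2 ≤ q.length := by
      by_contra hcon
      have h3 := hq.1; have h4 := hq.2; have h5 := hr.1; have h6 := hr.2
      exact har (by omega)
    obtain ⟨L, hL⟩ : ∃ L, q.length = L + 2 := ⟨q.length - 2, by omega⟩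
    have hps : ps q a r = q := by rw [← h1]; exact pv_ps_self q a hq
    rw [hL]
    simp only [findA]
    rw [if_pos (by rw [h1]; exact Ne.symm har)]
    rw [h1]
    rw [if_neg (show ¬(pg q r ≠ r) by simp [h2])]
    rw [h2]
    show (ps q a r, pg (ps q a r) a) = (q, r)
    rw [hps, h1]

-- ---- Python negative-index wraparound: reads/writes at x < 0 are reads/writes at x + len ----
lemma pv_pyIdx_neg (n : Nat) (x : Int) (h1 : -(n:Int) ≤ x) (h2 : x < 0) :
    PySem.List.pyIdx? n x = PySem.List.pyIdx? n (x + n) := by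
  unfold PySem.List.pyIdx?
  rw [if_neg (by omega), if_pos (by omega : -(n:Int) ≤ x), if_pos (by omega : (0:Int) ≤ x + n),
    if_pos (by omega : x + (n:Int) < n)]
  congr 1
  omega

lemma pv_pg_neg (p : List Int) (x : Int) (h1 : -(p.length:Int) ≤ x) (h2 : x < 0) :
    pg p x = pg p (x + p.length) := by
  simp only [pg, PySem.List.pyGetD, PySem.List.pyGet?, pv_pyIdx_neg p.length x h1 h2]

lemma pv_ps_neg (p : List Int) (x v : Int) (h1 : -(p.length:Int) ≤ x) (h2 : x < 0) :
    ps p x v = ps p (x + p.length) v := by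
  simp only [ps, PySem.List.pySetD, PySem.List.pySet?, pv_pyIdx_neg p.length x h1 h2]

lemma pv_findA_len : ∀ (f : Nat) (p : List Int) (x : Int), (findA f p x).1.length = p.length := by
  intro f
  induction f with
  | zero => intro p x; rfl
  | succ f ih =>
    intro p x
    simp only [findA]
    by_cases h : pg p x ≠ x
    · rw [if_pos h]
      show (ps (findA f p (pg p x)).1 x (findA f p (pg p x)).2).length = p.length
      rw [pv_len_ps, ih]
    · rw [if_neg h]

lemma pv_findA_neg (f : Nat) (p : List Int) (x : Int)
    (hR : ∀ z, inRI p z → inRI p (pg p z)) (h1 : -(p.length:Int) ≤ x) (h2 : x < 0) :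
    findA (f+1) p x = findA (f+1) p (x + p.length) := by
  have hxin : inRI p (x + p.length) := ⟨by omega, by omega⟩
  have hpg : pg p x = pg p (x + p.length) := pv_pg_neg p x h1 h2
  have hw : inRI p (pg p (x + p.length)) := hR _ hxin
  have hwx : pg p x ≠ x := by
    rw [hpg]
    intro hcon
    have h3 := hw.1
    rw [hcon] at h3
    omega
  simp only [findA]
  by_cases hwx' : pg p (x + p.length) = x + p.length
  · rw [if_pos hwx, if_neg (by simp [hwx'])]
    have hinner : findA f p (x + p.length) = (p, x + p.length) := by
      cases f with
      | zero => rfl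
      | succ f =>
        simp only [findA]
        rw [if_neg (by simp [hwx']), hwx']
    rw [hpg, hwx', hinner]
    have hps : ps p x (x + p.length) = p := by
      have hself := pv_ps_self p (x + p.length) hxin
      rw [hwx'] at hself
      rw [pv_ps_neg p x _ h1 h2]
      exact hself
    rw [hps, hpg, hwx']
  · rw [if_pos hwx, if_pos hwx']
    rw [hpg]
    have hlenP : (findA f p (pg p (x + p.length))).1.length = p.length := pv_findA_len f p _
    have hps2 : ps (findA f p (pg p (x + p.length))).1 x (findA f p (pg p (x + p.length))).2
        = ps (findA f p (pg p (x + p.length))).1 (x + p.length)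
            (findA f p (pg p (x + p.length))).2 := by
      rw [pv_ps_neg _ x _ (by rw [hlenP]; exact h1) h2, hlenP]
    rw [hps2]
    have hlen2 : (ps (findA f p (pg p (x + p.length))).1 (x + p.length)
        (findA f p (pg p (x + p.length))).2).length = p.length := by
      rw [pv_len_ps, hlenP]
    rw [pv_pg_neg _ x (by rw [hlen2]; exact h1) h2, hlen2]

lemma pv_rootB_neg (f : Nat) (p : List Int) (x : Int)
    (hR : ∀ z, inRI p z → inRI p (pg p z)) (h1 : -(p.length:Int) ≤ x) (h2 : x < 0) :
    rootB (f+1) p x = rootB (f+1) p (x + p.length) := by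
  have hxin : inRI p (x + p.length) := ⟨by omega, by omega⟩
  have hpg : pg p x = pg p (x + p.length) := pv_pg_neg p x h1 h2
  have hw : inRI p (pg p (x + p.length)) := hR _ hxin
  have hwx : pg p x ≠ x := by
    rw [hpg]
    intro hcon
    have h3 := hw.1
    rw [hcon] at h3
    omega
  simp only [rootB]
  by_cases hwx' : pg p (x + p.length) = x + p.length
  · rw [if_pos hwx, if_neg (by simp [hwx']), hpg, hwx']
    cases f with
    | zero => rfl
    | succ f =>
      simp only [rootB]
      rw [if_neg (by simp [hwx'])]
  · rw [if_pos hwx, if_pos hwx', hpg]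

lemma pv_compressB_neg (f : Nat) (p : List Int) (x r : Int)
    (h1 : -(p.length:Int) ≤ x) (h2 : x < 0) :
    compressB (f+1) p x r = compressB (f+1) p (x + p.length) r := by
  have hpg : pg p x = pg p (x + p.length) := pv_pg_neg p x h1 h2
  simp only [compressB]
  rw [hpg]
  by_cases hc : pg p (x + p.length) ≠ r
  · rw [if_pos hc, if_pos hc, pv_ps_neg p x r h1 h2]
  · rw [if_neg hc, if_neg hc]

-- normalising a possibly-negative label to the cell it denotes
lemma pv_find_norm (p : List Int) (x : Int)
    (h1 : -(p.length:Int) ≤ x) (h2 : x < (p.length:Int)) :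
    ∃ n, inRI p n ∧
      (∀ q : List Int, q.length = p.length → (∀ z, inRI q z → inRI q (pg q z)) →
        findA q.length q x = findA q.length q n) ∧
      (∀ q : List Int, q.length = p.length → (∀ z, inRI q z → inRI q (pg q z)) →
        findB q x = findB q n) := by
  by_cases hx : x < 0
  · refine ⟨x + p.length, ⟨by omega, by omega⟩, ?_, ?_⟩
    · intro q hq hRq
      obtain ⟨L, hL⟩ : ∃ L, q.length = L + 1 := ⟨q.length - 1, by omega⟩
      rw [hL]
      have h := pv_findA_neg L q x hRq (by rw [hq]; exact h1) hx
      rw [h, hq]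
    · intro q hq hRq
      simp only [findB]
      obtain ⟨L, hL⟩ : ∃ L, q.length = L + 1 := ⟨q.length - 1, by omega⟩
      rw [hL]
      rw [pv_rootB_neg L q x hRq (by rw [hq]; exact h1) hx,
        pv_compressB_neg L q x _ (by rw [hq]; exact h1) hx, hq]
  · exact ⟨x, ⟨by omega, h2⟩, fun q _ _ => rfl, fun q _ _ => rfl⟩

-- ---- the per-edge step of each driver loop ----
def stepA (st : List Int × List Int) (e : List Int) : List Int × List Int :=
  let f1 := findA st.1.length st.1 (pg e 0)
  let f2 := findA f1.1.length f1.1 (pg e 1)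
  if f1.2 ≠ f2.2 then unionA (pg e 0) (pg e 1) f2.1 st.2 else (f2.1, st.2)

def stepB (st : List Int × List Int) (e : List Int) : List Int × List Int :=
  let f1 := findB st.1 (pg e 0)
  let f2 := findB f1.1 (pg e 1)
  if f1.2 = f2.2 then (f2.1, st.2)
  else if pg st.2 f1.2 > pg st.2 f2.2 then (ps f2.1 f2.2 f1.2, st.2)
  else if pg st.2 f1.2 < pg st.2 f2.2 then (ps f2.1 f1.2 f2.2, st.2)
  else (ps f2.1 f1.2 f2.2, ps st.2 f2.2 (pg st.2 f2.2 + 1))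

lemma pv_step_core (p rank : List Int) (e : List Int) (hInv : InvP p)
    (h0 : -(p.length:Int) ≤ pg e 0 ∧ pg e 0 < (p.length:Int))
    (h1 : -(p.length:Int) ≤ pg e 1 ∧ pg e 1 < (p.length:Int)) :
    ∃ pr : List Int × List Int,
      stepA (p, rank) e = pr ∧ stepB (p, rank) e = pr ∧ InvP pr.1 ∧ pr.1.length = p.length := by
  obtain ⟨n0, hn0, hfA0, hfB0⟩ := pv_find_norm p (pg e 0) h0.1 h0.2
  obtain ⟨n1, hn1, hfA1, hfB1⟩ := pv_find_norm p (pg e 1) h1.1 h1.2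
  obtain ⟨Q1, r0, hA1, hB1, hlen1, hInv1, hr0in, hq1r0, hq1a, hP7a⟩ := pv_find_pack p n0 hInv hn0
  have h1' : inRI Q1 n1 := pv_inRI_of_len hlen1 hn1
  obtain ⟨Q2, r1, hA2, hB2, hlen2, hInv2, hr1in', hq2r1, hq2b, hP7b⟩ :=
    pv_find_pack Q1 n1 hInv1 h1'
  have hlen21 : Q2.length = p.length := hlen2.trans hlen1
  simp only [stepA, stepB]
  rw [hfA0 p rfl hInv.1, hfB0 p rfl hInv.1, hA1, hB1]
  rw [hfA1 Q1 hlen1 hInv1.1, hfB1 Q1 hlen1 hInv1.1, hA2, hB2]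
  by_cases hrr : r0 = r1
  · rw [if_neg (show ¬ (r0 ≠ r1) by simp [hrr]), if_pos hrr]
    exact ⟨(Q2, rank), rfl, rfl, hInv2, hlen21⟩
  · have hq1ain : inRI Q1 n0 := pv_inRI_of_len hlen1 hn0
    have hr0in1 : inRI Q1 r0 := pv_inRI_of_len hlen1 hr0in
    have hq2a : pg Q2 n0 = r0 := by
      rw [← hq1a]
      exact hP7b n0 hq1ain (by rw [hq1a]; exact hq1r0) (by rw [hq1a]; exact hrr)
    have hq2r0 : pg Q2 r0 = r0 := by
      have := hP7b r0 hr0in1 (by rw [hq1r0]; exact hq1r0) (by rw [hq1r0]; exact hrr)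
      rw [this, hq1r0]
    have hq2ain : inRI Q2 n0 := pv_inRI_of_len hlen21 hn0
    have hr0in2 : inRI Q2 r0 := pv_inRI_of_len hlen21 hr0in
    have hr1in2 : inRI Q2 r1 := pv_inRI_of_len hlen2 hr1in'
    have hb2in : inRI Q2 n1 := pv_inRI_of_len hlen2 h1'
    have hUA : unionA (pg e 0) (pg e 1) Q2 rank
        = (if pg rank r0 > pg rank r1 then (ps Q2 r1 r0, rank)
           else if pg rank r0 < pg rank r1 then (ps Q2 r0 r1, rank)
           else (ps Q2 r0 r1, ps rank r1 (pg rank r1 + 1))) := by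
      simp only [unionA]
      rw [hfA0 Q2 hlen21 hInv2.1]
      rw [pv_findA_idem Q2 n0 r0 hq2ain hr0in2 hq2a hq2r0]
      rw [hfA1 Q2 hlen21 hInv2.1]
      rw [pv_findA_idem Q2 n1 r1 hb2in hr1in2 hq2b hq2r1]
    rw [if_pos hrr, if_neg hrr, hUA]
    split_ifs with hc1 hc2
    · exact ⟨(ps Q2 r1 r0, rank), rfl, rfl,
        pv_InvP_link Q2 r1 r0 hInv2 hr1in2 hr0in2 hq2r1 hq2r0 (Ne.symm hrr),
        (pv_len_ps Q2 r1 r0).trans hlen21⟩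
    · exact ⟨(ps Q2 r0 r1, rank), rfl, rfl,
        pv_InvP_link Q2 r0 r1 hInv2 hr0in2 hr1in2 hq2r0 hq2r1 hrr,
        (pv_len_ps Q2 r0 r1).trans hlen21⟩
    · exact ⟨(ps Q2 r0 r1, ps rank r1 (pg rank r1 + 1)), rfl, rfl,
        pv_InvP_link Q2 r0 r1 hInv2 hr0in2 hr1in2 hq2r0 hq2r1 hrr,
        (pv_len_ps Q2 r0 r1).trans hlen21⟩

lemma pv_fold_eq (L : Nat) (tab : List (List Int)) :
    ∀ (p rank : List Int), InvP p → p.length = L →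
    (∀ e ∈ tab, (-(L:Int) ≤ pg e 0 ∧ pg e 0 < (L:Int)) ∧
      (-(L:Int) ≤ pg e 1 ∧ pg e 1 < (L:Int))) →
    tab.foldl stepA (p, rank) = tab.foldl stepB (p, rank) := by
  induction tab with
  | nil => intro p rank _ _ _; rfl
  | cons e rest ih =>
    intro p rank hInv hpl hall
    obtain ⟨pr, hA, hB, hInvp, hlenp⟩ :=
      pv_step_core p rank e hInv (by rw [hpl]; exact (hall e (by simp)).1)
        (by rw [hpl]; exact (hall e (by simp)).2)
    rw [List.foldl_cons, List.foldl_cons, hA, hB]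
    exact ih pr.1 pr.2 hInvp (hlenp.trans hpl) (fun e' he' => hall e' (by simp [he']))

-- ---- loop/shape conversions ----
lemma pv_foldl_range_getD {α β : Type} (xs : List α) (d : α) (f : β → α → β) (init : β) :
    (List.range xs.length).foldl (fun acc i => f acc (xs.getD i d)) init = xs.foldl f init := by
  induction xs using List.reverseRecOn generalizing init with
  | nil => rfl
  | append_singleton ys y ih =>
    have hlen : (ys ++ [y]).length = ys.length + 1 := by simp
    rw [hlen, List.range_succ, List.foldl_append, List.foldl_append]
    rw [List.foldl_cons, List.foldl_nil, List.foldl_cons, List.foldl_nil]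
    have h1 : (List.range ys.length).foldl (fun acc i => f acc ((ys ++ [y]).getD i d)) init
        = ys.foldl f init := by
      rw [← ih init]
      apply List.foldl_ext
      intro acc i hi
      simp only [List.mem_range] at hi
      congr 1
      rw [List.getD_eq_getElem?_getD, List.getD_eq_getElem?_getD, List.getElem?_append_left hi]
    rw [h1]
    congr 1
    rw [List.getD_eq_getElem?_getD, List.getElem?_append_right (le_refl ys.length)]
    simp

lemma pv_foldl_pvMax3 (rest : List (List Int)) : ∀ acc : Int,
    rest.foldl (fun v e => pvMax3 v (pg e 0) (pg e 1)) (some acc)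
      = some (rest.foldl (fun m e2 => max m (rowMax e2)) acc) := by
  induction rest with
  | nil => intro acc; rfl
  | cons e rest ih =>
    intro acc
    rw [List.foldl_cons, List.foldl_cons]
    have h : pvMax3 (some acc) (pg e 0) (pg e 1) = some (max acc (rowMax e)) := by
      simp [pvMax3, rowMax, max_assoc]
    rw [h, ih]

lemma pv_makeset_eq (tab : List (List Int)) : make_setA tab = maxB tab := by
  show (List.range tab.length).foldl
      (fun (v : Option Int) (x : Nat) =>
        (fun v e => pvMax3 v (pg e 0) (pg e 1)) v (PySem.List.pyGetD tab (x : Int) []))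
      none = maxB tab
  simp only [PySem.List.pyGetD_natCast]
  rw [pv_foldl_range_getD tab [] (fun v e => pvMax3 v (pg e 0) (pg e 1)) none]
  cases tab with
  | nil => rfl
  | cons e rest =>
    rw [List.foldl_cons]
    show rest.foldl (fun v e => pvMax3 v (pg e 0) (pg e 1)) (some (rowMax e)) = _
    rw [pv_foldl_pvMax3]
    rfl

lemma pv_portA_fold (tab : List (List Int)) (v : Int) :
    (List.range tab.length).foldl
      (fun (st : List Int × List Int) (x : Nat) =>
        let row := PySem.List.pyGetD tab (x : Int) []
        let f1 := findA st.1.length st.1 (pg row 0)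
        let f2 := findA f1.1.length f1.1 (pg row 1)
        if f1.2 ≠ f2.2 then unionA (pg row 0) (pg row 1) f2.1 st.2
        else (f2.1, st.2))
      (PySem.List.pyRange 0 v 1, List.replicate v.toNat 0)
    = tab.foldl stepA (PySem.List.pyRange 0 v 1, List.replicate v.toNat 0) := by
  show (List.range tab.length).foldl
      (fun (st : List Int × List Int) (x : Nat) => stepA st (PySem.List.pyGetD tab (x : Int) []))
      (PySem.List.pyRange 0 v 1, List.replicate v.toNat 0) = _
  simp only [PySem.List.pyGetD_natCast]
  exact pv_foldl_range_getD tab [] stepA _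

lemma pv_maxB_bound (tab : List (List Int)) (m : Int) (hm : maxB tab = some m) :
    ∀ e ∈ tab, rowMax e ≤ m := by
  intro e he
  cases tab with
  | nil => simp at he
  | cons e0 rest =>
    have hm' : rest.foldl (fun acc e2 => max acc (rowMax e2)) (rowMax e0) = m :=
      Option.some.inj hm
    have hcv : rest.foldl (fun acc e2 => max acc (rowMax e2)) (rowMax e0)
        = (rest.map rowMax).foldl max (rowMax e0) := by rw [List.foldl_map]
    have hfm := PySem.List.le_foldl_max (rest.map rowMax) (rowMax e0)
    rcases List.mem_cons.mp he with rfl | hmem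
    · rw [← hm', hcv]; exact hfm.1
    · rw [← hm', hcv]; exact hfm.2 (rowMax e) (List.mem_map_of_mem hmem)

lemma pv_init_pg (v x : Int) (hx : inRI (PySem.List.pyRange 0 v 1) x) :
    pg (PySem.List.pyRange 0 v 1) x = x := by
  obtain ⟨hx0, hx1⟩ := hx
  have hxl : x.toNat < (PySem.List.pyRange 0 v 1).length := by omega
  rw [pg, PySem.List.pyGetD_of_nonneg _ _ hx0, List.getD_eq_getElem?_getD,
    List.getElem?_eq_getElem hxl, Option.getD_some, PySem.List.getElem_pyRange_one 0 v x.toNat hxl]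
  omega

lemma pv_portA_red (tab : List (List Int)) (m : Int) (hm : make_setA tab = some m) :
    find_union_make_set tab
      = (tab.foldl stepA (PySem.List.pyRange 0 (m+1) 1, List.replicate (m+1).toNat 0)).1 := by
  unfold find_union_make_set
  rw [hm]
  show ((List.range tab.length).foldl _
      (PySem.List.pyRange 0 (m+1) 1, List.replicate (m+1).toNat 0)).1 = _
  rw [pv_portA_fold]

lemma pv_portB_red (tab : List (List Int)) (m : Int) (hm : maxB tab = some m) :
    find_union_make_set_alt tab
      = (tab.foldl stepB (PySem.List.pyRange 0 (m+1) 1, List.replicate (m+1).toNat 0)).1 := by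
  unfold find_union_make_set_alt
  rw [hm]
  rfl

-- ===== VERDICT (by name: the statement is the Claim_ definition above) =====
theorem find_union_make_set_spec : Claim_equal_find_union_make_set := by
  intro tab hdom hpre
  obtain ⟨hne, hrows⟩ := hpre
  unfold Spec_find_union_make_set
  obtain ⟨m, hm⟩ : ∃ m, maxB tab = some m := by
    cases tab with
    | nil => exact absurd rfl hne
    | cons e0 rest => exact ⟨_, rfl⟩
  have hbound := pv_maxB_bound tab m hm
  have hpvm : pvM tab = m := by
    cases tab with
    | nil => exact absurd rfl hne
    | cons e0 rest => exact Option.some.inj hm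
  have hm0 : 0 ≤ m := by
    obtain ⟨e0, rest, rfl⟩ : ∃ e0 rest, tab = e0 :: rest := by
      cases tab with
      | nil => exact absurd rfl hne
      | cons a b => exact ⟨a, b, rfl⟩
    have hlow : -(pvM (e0 :: rest) + 1) ≤ pg e0 0 := (hrows e0 (by simp)).2.1
    rw [hpvm] at hlow
    have hhi : pg e0 0 ≤ m := le_trans (le_max_left _ _) (hbound e0 (by simp))
    omega
  have hlenp0 : ((PySem.List.pyRange 0 (m+1) 1).length : Int) = m + 1 := by
    rw [PySem.List.length_pyRange_one]
    omega
  have hInv0 : InvP (PySem.List.pyRange 0 (m+1) 1) := by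
    constructor
    · intro z hz
      rw [pv_init_pg (m+1) z hz]
      exact hz
    · intro z hz
      exact ⟨0, show pg _ z = z from pv_init_pg (m+1) z hz⟩
  have hall : ∀ e ∈ tab,
      (-(((PySem.List.pyRange 0 (m+1) 1).length : Nat) : Int) ≤ pg e 0 ∧
        pg e 0 < (((PySem.List.pyRange 0 (m+1) 1).length : Nat) : Int)) ∧
      (-(((PySem.List.pyRange 0 (m+1) 1).length : Nat) : Int) ≤ pg e 1 ∧
        pg e 1 < (((PySem.List.pyRange 0 (m+1) 1).length : Nat) : Int)) := by
    intro e he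
    have hr := hrows e he
    have hb := hbound e he
    have hb0 : pg e 0 ≤ m := le_trans (le_max_left _ _) hb
    have hb1 : pg e 1 ≤ m := le_trans (le_max_right _ _) hb
    have h00 : -(m + 1) ≤ pg e 0 := by have := hr.2.1; rw [hpvm] at this; exact this
    have h01 : -(m + 1) ≤ pg e 1 := by have := hr.2.2; rw [hpvm] at this; exact this
    constructor
    · exact ⟨by rw [hlenp0]; omega, by rw [hlenp0]; omega⟩
    · exact ⟨by rw [hlenp0]; omega, by rw [hlenp0]; omega⟩
  rw [pv_portA_red tab m (by rw [pv_makeset_eq]; exact hm), pv_portB_red tab m hm,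
    pv_fold_eq (PySem.List.pyRange 0 (m+1) 1).length tab (PySem.List.pyRange 0 (m+1) 1)
      (List.replicate (m+1).toNat 0) hInv0 rfl hall]
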